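-- pv_equiv track=rewrite | github.com/AdamZhouSE/pythonHomework | Code/CodeRecords/2594/47920/262250.py | is_re
-- ===== SOURCE A (Python) =====
-- import math
--
-- def is_re(li): #是否有重复的
--     flag = False
--     for i in range(math.ceil(len(li)/2)):
--         for j in range(len(li)):
--             if(i != j):
--                 if(li[i] == li[j]):
--                     flag = True
--     return flag
-- ===== SOURCE B (Python) =====
-- def is_re(li):
--     h = (len(li) + 1) // 2
--     first, rest = li[:h], li[h:]
--     fs = set(first)
--     return len(fs) != len(first) or not fs.isdisjoint(rest)
-- ===== Notes on version B (the rewrite author's own statement) =====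
-- stated objective: simpler
-- what changed: Replaces the quadratic nested index-pair loop with a set-algebra decomposition: the first half has an internal duplicate (set size differs from length) or shares a value with the rest (non-disjoint sets).
import Mathlib
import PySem

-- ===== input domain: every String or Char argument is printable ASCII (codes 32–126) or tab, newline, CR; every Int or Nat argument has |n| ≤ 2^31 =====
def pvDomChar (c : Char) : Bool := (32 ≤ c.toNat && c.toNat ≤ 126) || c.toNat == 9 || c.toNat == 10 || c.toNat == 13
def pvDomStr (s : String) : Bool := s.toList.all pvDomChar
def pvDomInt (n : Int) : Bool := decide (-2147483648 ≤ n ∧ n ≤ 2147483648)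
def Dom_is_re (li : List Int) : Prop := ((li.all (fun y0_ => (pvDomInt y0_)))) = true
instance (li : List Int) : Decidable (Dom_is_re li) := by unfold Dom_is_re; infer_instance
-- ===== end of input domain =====

-- B replaces A's quadratic nested index-pair loop by a linear set-algebra decomposition
-- over the two halves of the list (internal duplicate in the first half, or a value shared
-- with the rest); timing is as measured by the check.

-- ===== PORT A =====
-- math.ceil(len(li)/2) = (len(li)+1)/2 exactly (length is a nonnegative machine-size int)
def is_re (li : List Int) : Bool :=
  (PySem.List.pyRange 0 (((li.length + 1) / 2 : Nat) : Int) 1).foldl (fun flag i =>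
    (PySem.List.pyRange 0 (li.length : Int) 1).foldl (fun flag j =>
      if i ≠ j then
        if PySem.List.pyGetD li i 0 = PySem.List.pyGetD li j 0 then true else flag
      else flag) flag) false

-- ===== PORT B =====
-- li[:h] / li[h:] with 0 ≤ h are exactly take/drop (PySem.List.slice_to / slice_from)
def is_re_alt (li : List Int) : Bool :=
  let h := (li.length + 1) / 2
  let first := li.take h
  let rest := li.drop h
  let fs : PySem.Set Int := PySem.Set.ofList first
  decide ((fs.length : Int) ≠ (first.length : Int)) || !(PySem.Set.isdisjoint fs rest)

-- ===== PRECONDITION & SPEC =====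
def Spec_is_re (li : List Int) (out : Bool) : Prop := out = is_re_alt li
instance (li : List Int) (out : Bool) : Decidable (Spec_is_re li out) := by unfold Spec_is_re; infer_instance

-- ===== CLAIM (what is proved, stated in full; the proofs are below) =====
def Claim_equal_is_re : Prop := ∀ (li : List Int), Dom_is_re li → Spec_is_re li (is_re li)

-- ===== LEMMAS AND PROOFS =====

theorem foldl_or_eq_any {α : Type} (g : α → Bool) (l : List α) (b : Bool) :
    l.foldl (fun acc x => acc || g x) b = (b || l.any g) := by
  induction l generalizing b with
  | nil => simp
  | cons x t ih => simp [List.foldl_cons, ih, Bool.or_assoc]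

theorem len_ofList_eq_iff_nodup {α : Type} [DecidableEq α] (xs : List α) :
    (PySem.Set.ofList xs).length = xs.length ↔ xs.Nodup := by
  induction xs using List.reverseRecOn with
  | nil => simp [PySem.Set.ofList_nil]
  | append_singleton t x ih =>
    rw [PySem.Set.ofList_append_singleton, PySem.Set.add_eq_ite]
    by_cases hx : x ∈ PySem.Set.ofList t
    · have hxt : x ∈ t := (PySem.Set.mem_ofList _ _).1 hx
      have hle := PySem.Set.length_ofList_le (xs := t)
      simp only [if_pos hx, List.length_append, List.length_singleton]
      constructor
      · intro h; omega
      · intro h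
        have := (List.nodup_append.1 h).2.2
        exact absurd hxt (by simpa using this x hxt)
    · have hxt : x ∉ t := fun h => hx ((PySem.Set.mem_ofList _ _).2 h)
      simp only [if_neg hx, List.length_append, List.length_singleton,
        List.nodup_append, List.nodup_singleton]
      constructor
      · intro h
        refine ⟨ih.1 (by omega), trivial, ?_⟩
        intro a ha b hbe h
        exact hxt (List.mem_singleton.1 hbe ▸ h ▸ ha)
      · rintro ⟨h, -, -⟩; have := ih.2 h; omega

-- The common characterisation: some index pair (i anchored in the first half) collides.
theorem is_re_eq_true_iff (li : List Int) :
    is_re li = true ↔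
      ∃ i j : Nat, i < (li.length + 1) / 2 ∧ j < li.length ∧ i ≠ j ∧
        li.getD i 0 = li.getD j 0 := by
  unfold is_re
  have hinner : ∀ (i : Int) (flag : Bool),
      (PySem.List.pyRange 0 (li.length : Int) 1).foldl (fun flag j =>
        if i ≠ j then
          if PySem.List.pyGetD li i 0 = PySem.List.pyGetD li j 0 then true else flag
        else flag) flag
      = (flag || (PySem.List.pyRange 0 (li.length : Int) 1).any (fun j =>
          decide (i ≠ j) && decide (PySem.List.pyGetD li i 0 = PySem.List.pyGetD li j 0))) := by
    intro i flag
    rw [show (fun flag j =>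
        if i ≠ j then
          if PySem.List.pyGetD li i 0 = PySem.List.pyGetD li j 0 then true else flag
        else flag)
      = (fun flag j =>
          if (decide (i ≠ j) && decide (PySem.List.pyGetD li i 0 = PySem.List.pyGetD li j 0)) = true
          then true else flag) from by
        funext flag j; by_cases h1 : i ≠ j <;> by_cases h2 : PySem.List.pyGetD li i 0 = PySem.List.pyGetD li j 0 <;>
          simp [h1, h2]]
    exact PySem.List.foldl_if_true_eq _ _ _
  simp only [hinner]
  rw [foldl_or_eq_any]
  simp only [Bool.false_or, List.any_eq_true, PySem.List.mem_pyRange_one,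
    Bool.and_eq_true, decide_eq_true_eq]
  constructor
  · rintro ⟨i, ⟨hi0, hih⟩, j, ⟨hj0, hjn⟩, hne, heq⟩
    refine ⟨i.toNat, j.toNat, ?_, ?_, ?_, ?_⟩
    · omega
    · omega
    · omega
    · rwa [PySem.List.pyGetD_of_nonneg li 0 hi0, PySem.List.pyGetD_of_nonneg li 0 hj0] at heq
  · rintro ⟨i, j, hi, hj, hne, heq⟩
    refine ⟨(i : Int), ⟨by omega, by omega⟩, (j : Int), ⟨by omega, by omega⟩, by omega, ?_⟩
    rw [PySem.List.pyGetD_natCast li i 0, PySem.List.pyGetD_natCast li j 0]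
    exact heq

theorem is_re_alt_eq_true_iff (li : List Int) :
    is_re_alt li = true ↔
      ¬ (li.take ((li.length + 1) / 2)).Nodup ∨
        ∃ x, x ∈ li.take ((li.length + 1) / 2) ∧ x ∈ li.drop ((li.length + 1) / 2) := by
  unfold is_re_alt
  simp only [Bool.or_eq_true, decide_eq_true_eq, Bool.not_eq_true']
  constructor
  · rintro (h | h)
    · left; intro hn
      exact h (by exact_mod_cast congrArg (Nat.cast (R := Int)) ((len_ofList_eq_iff_nodup _).2 hn))
    · right
      by_contra hc
      push Not at hc
      have : PySem.Set.isdisjoint (PySem.Set.ofList (li.take ((li.length + 1) / 2)))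
          (li.drop ((li.length + 1) / 2)) = true := by
        refine (PySem.Set.isdisjoint_iff _ _).2 ?_
        intro x hx
        exact hc x ((PySem.Set.mem_ofList _ _).1 hx)
      simp [this] at h
  · rintro (h | ⟨x, hx1, hx2⟩)
    · left
      intro heq
      exact h ((len_ofList_eq_iff_nodup _).1 (by exact_mod_cast heq))
    · right
      simp only [Bool.eq_false_iff, Ne]
      intro hdis
      exact ((PySem.Set.isdisjoint_iff _ _).1 hdis x ((PySem.Set.mem_ofList _ _).2 hx1)) hx2

-- The two characterisations agree.
theorem pair_iff_halves (li : List Int) :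
    (∃ i j : Nat, i < (li.length + 1) / 2 ∧ j < li.length ∧ i ≠ j ∧
        li.getD i 0 = li.getD j 0) ↔
      ¬ (li.take ((li.length + 1) / 2)).Nodup ∨
        ∃ x, x ∈ li.take ((li.length + 1) / 2) ∧ x ∈ li.drop ((li.length + 1) / 2) := by
  set h := (li.length + 1) / 2 with hh
  have hle : h ≤ li.length := by omega
  have hlen : (li.take h).length = h := by simp; omega
  constructor
  · rintro ⟨i, j, hi, hj, hne, heq⟩
    rw [List.getD_eq_getElem li 0 (by omega), List.getD_eq_getElem li 0 hj] at heq
    by_cases hjh : j < h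
    · left
      intro hnd
      have h1 : (li.take h)[i]'(by omega) = li[i]'(by omega) := List.getElem_take
      have h2 : (li.take h)[j]'(by omega) = li[j]'(by omega) := List.getElem_take
      exact hne (hnd.getElem_inj_iff.1 (by rw [h1, h2]; exact heq))
    · right
      refine ⟨li[i]'(by omega), ?_, ?_⟩
      · have h1 : (li.take h)[i]'(by omega) = li[i]'(by omega) := List.getElem_take
        exact h1 ▸ List.getElem_mem _
      · have h2 : (li.drop h)[j - h]'(by simp; omega) = li[h + (j - h)]'(by omega) :=
          List.getElem_drop
        have : li[h + (j - h)]'(by omega) = li[j]'(by omega) := by congr 1; omega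
        rw [this, ← heq] at h2
        exact h2 ▸ List.getElem_mem _
  · rintro (hnd | ⟨x, hx1, hx2⟩)
    · rw [List.nodup_iff_getElem?_ne_getElem?] at hnd
      push Not at hnd
      obtain ⟨i, j, hij, hjl, heq⟩ := hnd
      rw [hlen] at hjl
      refine ⟨i, j, by omega, by omega, by omega, ?_⟩
      rw [List.getElem?_eq_getElem (by omega), List.getElem?_eq_getElem (by omega)] at heq
      have h1 : (li.take h)[i]'(by omega) = li[i]'(by omega) := List.getElem_take
      have h2 : (li.take h)[j]'(by omega) = li[j]'(by omega) := List.getElem_take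
      rw [List.getD_eq_getElem li 0 (by omega), List.getD_eq_getElem li 0 (by omega),
        ← h1, ← h2]
      exact Option.some.inj heq
    · obtain ⟨i, hi, hie⟩ := List.mem_iff_getElem.1 hx1
      obtain ⟨k, hk, hke⟩ := List.mem_iff_getElem.1 hx2
      rw [hlen] at hi
      have hk' : k < li.length - h := by simpa using hk
      refine ⟨i, h + k, hi, by omega, by omega, ?_⟩
      have h1 : (li.take h)[i]'(by omega) = li[i]'(by omega) := List.getElem_take
      have h2 : (li.drop h)[k]'(by simpa using hk) = li[h + k]'(by omega) := List.getElem_drop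
      rw [List.getD_eq_getElem li 0 (by omega), List.getD_eq_getElem li 0 (by omega),
        ← h1, ← h2, hie, hke]

-- ===== VERDICT (by name: the statement is the Claim_ definition above) =====
theorem is_re_spec : Claim_equal_is_re := by
  intro li _
  unfold Spec_is_re
  have := (is_re_eq_true_iff li).trans ((pair_iff_halves li).trans
    (is_re_alt_eq_true_iff li).symm)
  cases hA : is_re li <;> cases hB : is_re_alt li <;> simp_all
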